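-- pv_equiv track=rewrite | github.com/agslima/software-delivery-pipeline | scripts/report-governance-slos.py | count_success_conclusions
-- ===== SOURCE A (Python) =====
-- from typing import Any
--
-- def count_success_conclusions(runs: list[dict[str, Any]]) -> tuple[int, int]:
--     """
--     Count successful runs among completed, relevant workflow or job run entries.
--
--     Parameters:
--         runs (list[dict[str, Any]]): Sequence of run objects as returned by GitHub API.
--
--     Returns:
--         tuple[int, int]: The success count and the count of runs whose
--         conclusion is neither cancelled, skipped, nor missing.
--     """
--     relevant = [
--         run
--         for run in runs
--         if run.get("conclusion") not in {"cancelled", "skipped", None}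
--     ]
--     successes = [run for run in relevant if run.get("conclusion") == "success"]
--     return len(successes), len(relevant)
-- ===== SOURCE B (Python) =====
-- def count_success_conclusions(runs):
--     """Build a frequency tally of conclusion values, then derive both counts
--     by arithmetic on the aggregates: relevant = total - excluded tallies."""
--     tally = {}
--     for run in runs:
--         c = run.get("conclusion")
--         tally[c] = tally.get(c, 0) + 1
--     excluded = tally.get("cancelled", 0) + tally.get("skipped", 0) + tally.get(None, 0)
--     return tally.get("success", 0), len(runs) - excluded
-- ===== Notes on version B (the rewrite author's own statement) =====
-- stated objective: alternative
-- what changed: Replaces A's two staged filtered lists with a frequency tally (histogram) of conclusion values; both results are then read off the aggregate counts, with relevant computed by subtracting the excluded tallies from len(runs).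
import Mathlib
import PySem

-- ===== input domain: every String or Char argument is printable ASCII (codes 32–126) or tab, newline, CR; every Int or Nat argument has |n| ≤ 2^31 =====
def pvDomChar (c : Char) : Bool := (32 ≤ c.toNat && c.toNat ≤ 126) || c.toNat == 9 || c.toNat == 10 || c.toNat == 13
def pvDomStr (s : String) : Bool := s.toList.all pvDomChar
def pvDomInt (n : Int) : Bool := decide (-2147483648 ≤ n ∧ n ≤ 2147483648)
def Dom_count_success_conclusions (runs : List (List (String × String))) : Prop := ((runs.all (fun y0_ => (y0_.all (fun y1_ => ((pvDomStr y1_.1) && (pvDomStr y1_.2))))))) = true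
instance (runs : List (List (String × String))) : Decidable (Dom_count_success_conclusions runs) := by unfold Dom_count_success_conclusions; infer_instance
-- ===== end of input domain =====

-- B replaces A's two staged filtered lists with a frequency tally of conclusion
-- values and derives both counts by arithmetic on the aggregates; objective: alternative.

-- ===== PORT A =====
-- run.get("conclusion"): first-match lookup in the association list (dict convention)
def count_success_conclusions (runs : List (List (String × String))) : Int × Int :=
  let relevant := runs.filter (fun run =>
    match run.lookup "conclusion" with
    | none => false
    | some c => !(c == "cancelled" || c == "skipped"))
  let successes := relevant.filter (fun run => run.lookup "conclusion" == some "success")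
  ((successes.length : Int), (relevant.length : Int))

-- ===== PORT B =====
-- tally[c] = tally.get(c, 0) + 1 over the loop; keys are Option String (None = missing key)
def count_success_conclusions_alt (runs : List (List (String × String))) : Int × Int :=
  let tally := runs.foldl (fun t run =>
    let c := run.lookup "conclusion"
    t.insert c (t.getD c 0 + 1)) (PySem.Dict.empty)
  let excluded := tally.getD (some "cancelled") 0 + tally.getD (some "skipped") 0
      + tally.getD none 0
  (tally.getD (some "success") 0, PySem.List.len runs - excluded)

-- ===== PRECONDITION & SPEC =====
def Spec_count_success_conclusions (runs : List (List (String × String))) (out : Int × Int) : Prop := out = count_success_conclusions_alt runs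
instance (runs : List (List (String × String))) (out : Int × Int) : Decidable (Spec_count_success_conclusions runs out) := by unfold Spec_count_success_conclusions; infer_instance

-- ===== CLAIM (what is proved, stated in full; the proofs are below) =====
def Claim_equal_count_success_conclusions : Prop := ∀ (runs : List (List (String × String))), Dom_count_success_conclusions runs → Spec_count_success_conclusions runs (count_success_conclusions runs)

-- ===== LEMMAS AND PROOFS =====

-- predicate of A's first filter, on the looked-up conclusion value
def relevantP (c : Option String) : Bool :=
  match c with
  | none => false
  | some c => !(c == "cancelled" || c == "skipped")

-- counting the relevant conclusions = total minus the excluded tallies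
theorem countP_relevant (cs : List (Option String)) :
    ((cs.countP relevantP : Int))
      = (cs.length : Int) - cs.count (some "cancelled") - cs.count (some "skipped")
          - cs.count none := by
  induction cs with
  | nil => simp
  | cons c cs ih =>
    simp only [List.countP_cons, List.count_cons, List.length_cons]
    rcases c with _ | s
    · simp [relevantP]; omega
    · by_cases h1 : s = "cancelled"
      · subst h1; simp [relevantP]; omega
      · by_cases h2 : s = "skipped"
        · subst h2; simp [relevantP]; omega
        · simp [relevantP, h1, h2]; omega

-- a success conclusion is always relevant
theorem countP_success (cs : List (Option String)) :
    cs.countP (fun c => (c == some "success") && relevantP c)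
      = cs.count (some "success") := by
  rw [List.count]
  apply List.countP_congr
  intro c _
  rcases c with _ | s
  · simp [relevantP]
  · by_cases h : s = "success" <;> simp [relevantP, h]

-- A's two filtered lists, expressed through counts of conclusion values
theorem countA_eq_counts (runs : List (List (String × String))) :
    count_success_conclusions runs
      = (((runs.map (fun run => run.lookup "conclusion")).count (some "success") : Int),
         ((runs.length : Int)
           - (runs.map (fun run => run.lookup "conclusion")).count (some "cancelled")
           - (runs.map (fun run => run.lookup "conclusion")).count (some "skipped")
           - (runs.map (fun run => run.lookup "conclusion")).count none)) := by
  unfold count_success_conclusions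
  simp only [List.filter_filter, ← List.countP_eq_length_filter]
  rw [show (fun (a : List (String × String)) =>
        (a.lookup "conclusion" == some "success") &&
          (match a.lookup "conclusion" with
           | none => false
           | some c => !(c == "cancelled" || c == "skipped")))
      = ((fun c => (c == some "success") && relevantP c)
          ∘ (fun r : List (String × String) => r.lookup "conclusion")) from rfl]
  rw [show (fun (run : List (String × String)) =>
        match run.lookup "conclusion" with
        | none => false
        | some c => !(c == "cancelled" || c == "skipped"))
      = (relevantP ∘ (fun r : List (String × String) => r.lookup "conclusion")) from rfl]
  rw [← List.countP_map, ← List.countP_map]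
  rw [countP_success]
  rw [Prod.mk.injEq]
  refine ⟨rfl, ?_⟩
  rw [countP_relevant]
  simp

-- B's tally looked up at any key is the count of that conclusion value
theorem tally_getD (runs : List (List (String × String))) (k : Option String) :
    (runs.foldl (fun (t : PySem.Dict (Option String) Int) run =>
        let c := run.lookup "conclusion"
        t.insert c (t.getD c 0 + 1)) (PySem.Dict.empty)).getD k 0
      = ((runs.map (fun run => run.lookup "conclusion")).count k : Int) := by
  show (runs.foldl (fun (t : PySem.Dict (Option String) Int) run =>
      t.insert (run.lookup "conclusion") (t.getD (run.lookup "conclusion") 0 + 1))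
      PySem.Dict.empty).getD k 0
    = ((runs.map (fun run => run.lookup "conclusion")).count k : Int)
  have h := PySem.Dict.getD_foldl_insert_add_one
      (l := runs.map (fun run => run.lookup "conclusion"))
      (d := (PySem.Dict.empty : PySem.Dict (Option String) Int)) (v := k)
  rw [List.foldl_map] at h
  simpa [PySem.Dict.getD_empty] using h

-- ===== VERDICT (by name: the statement is the Claim_ definition above) =====
theorem count_success_conclusions_spec : Claim_equal_count_success_conclusions := by
  intro runs _
  unfold Spec_count_success_conclusions count_success_conclusions_alt
  simp only [tally_getD, countA_eq_counts, PySem.List.len_eq]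
  simp only [Prod.mk.injEq, true_and]
  ring
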